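-- pv_equiv track=rewrite | github.com/MrBrantCode/unitest_baseline | mut_generate/mist_train_taco/taco_7454/solution.py | is_adam_number
-- ===== SOURCE A (Python) =====
-- def is_adam_number(N):
--     # Reverse the number N
--     dn = N
--     rev = 0
--     while dn != 0:
--         rev = rev * 10 + dn % 10
--         dn = dn // 10
--
--     # Square of the original number and the reversed number
--     sn = N * N
--     srn = rev * rev
--
--     # Reverse the square of the reversed number
--     srev = 0
--     dr = srn
--     while dr != 0:
--         srev = srev * 10 + dr % 10
--         dr = dr // 10
--
--     # Check if the reversed square of the reversed number is equal to the square of the original number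
--     if srev == sn:
--         return 'YES'
--     return 'NO'
-- ===== SOURCE B (Python) =====
-- def _digits(n):
--     # little-endian digit list of n (empty for n <= 0)
--     ds = []
--     while n > 0:
--         ds.append(n % 10)
--         n //= 10
--     return ds
--
--
-- def _rev(n):
--     ds = _digits(n)
--     return sum(d * 10 ** (len(ds) - 1 - i) for i, d in enumerate(ds))
--
--
-- def is_adam_number(N):
--     r = _rev(N)
--     return 'YES' if _rev(r * r) == N * N else 'NO'
-- ===== Notes on version B (the rewrite author's own statement) =====
-- stated objective: alternative
-- what changed: B materializes the digit list once and recombines it positionally (each digit times ten to the power len-1-i, summed over enumerate) instead of A's two inline Horner-accumulator while-loops; Pre_ excludes negative N, on which Python A never returns (its digit loop never terminates under floor division).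
import Mathlib
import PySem

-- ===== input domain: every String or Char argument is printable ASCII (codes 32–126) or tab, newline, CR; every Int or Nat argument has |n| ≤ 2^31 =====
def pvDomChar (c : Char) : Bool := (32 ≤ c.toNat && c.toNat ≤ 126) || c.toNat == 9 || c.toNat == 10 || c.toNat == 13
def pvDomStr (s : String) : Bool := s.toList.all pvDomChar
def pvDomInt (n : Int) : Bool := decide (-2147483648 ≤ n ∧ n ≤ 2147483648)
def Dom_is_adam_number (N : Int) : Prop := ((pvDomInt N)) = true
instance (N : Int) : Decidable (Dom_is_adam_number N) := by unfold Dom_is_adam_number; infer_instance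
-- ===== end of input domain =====

-- B replaces A's two inline Horner-accumulator while-loops by materializing the digit list
-- once and recombining it positionally (sum of d * 10^(len-1-i) over enumerate); same cost.

-- termination measure for the digit loops (cited by decreasing_by)
theorem pvFloordiv10_toNat_lt (n : Int) (h : 0 < n) :
    (PySem.Int.floordiv n 10).toNat < n.toNat := by
  rw [PySem.Int.floordiv_eq_ediv_of_pos (by omega)]; omega

-- ===== PORT A =====
-- A's reversal loop:  while dn != 0: rev = rev*10 + dn%10; dn = dn//10.
-- For negative dn Python never terminates (floor division keeps it negative); excluded by
-- Pre_, so the port stops there (guard 0 < dn).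
def pvRevLoopA (dn rev : Int) : Int :=
  if h : 0 < dn then
    pvRevLoopA (PySem.Int.floordiv dn 10) (rev * 10 + PySem.Int.mod dn 10)
  else rev
termination_by dn.toNat
decreasing_by exact pvFloordiv10_toNat_lt dn h

def is_adam_number (N : Int) : String :=
  let rev := pvRevLoopA N 0
  let sn := N * N
  let srn := rev * rev
  let srev := pvRevLoopA srn 0
  if srev = sn then "YES" else "NO"

-- ===== PORT B =====
-- _digits: the little-endian digit list (the Python while-loop appending n % 10)
def pvDigitsB (n : Int) (ds : List Int) : List Int :=
  if h : 0 < n then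
    pvDigitsB (PySem.Int.floordiv n 10) (ds ++ [PySem.Int.mod n 10])
  else ds
termination_by n.toNat
decreasing_by exact pvFloordiv10_toNat_lt n h

-- the positional sum  sum(d * 10 ** (len(ds) - 1 - i) for i, d in enumerate(ds));
-- the exponent len-1-i is nonnegative for every produced index, so .toNat is exact
def pvPosSum (ds : List Int) : Int :=
  (PySem.List.enumerate ds 0).foldl
    (fun acc p => acc + p.2 * 10 ^ (((ds.length : Int) - 1 - p.1).toNat)) 0

def pvRevB (n : Int) : Int := pvPosSum (pvDigitsB n [])

def is_adam_number_alt (N : Int) : String :=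
  let r := pvRevB N
  if pvRevB (r * r) = N * N then "YES" else "NO"

-- ===== PRECONDITION & SPEC =====
-- Pre_ excludes negative N, on which Python A never returns (its `while dn != 0`
-- loop never terminates: floor division keeps a negative value negative).
def Pre_is_adam_number (N : Int) : Prop := 0 ≤ N
instance (N : Int) : Decidable (Pre_is_adam_number N) := by unfold Pre_is_adam_number; infer_instance
def pvWitness_is_adam_number : Int := (13)

def Spec_is_adam_number (N : Int) (out : String) : Prop := out = is_adam_number_alt N
instance (N : Int) (out : String) : Decidable (Spec_is_adam_number N out) := by unfold Spec_is_adam_number; infer_instance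

-- ===== CLAIM (what is proved, stated in full; the proofs are below) =====
def Claim_equal_is_adam_number : Prop := ∀ (N : Int), Dom_is_adam_number N → Pre_is_adam_number N → Spec_is_adam_number N (is_adam_number N)

-- ===== LEMMAS AND PROOFS =====

theorem pvDigitsB_append (n : Int) : ∀ ds : List Int, pvDigitsB n ds = ds ++ pvDigitsB n [] := by
  induction hk : n.toNat using Nat.strong_induction_on generalizing n with
  | _ k ih =>
      intro ds
      by_cases h : 0 < n
      · rw [pvDigitsB, dif_pos h]
        conv_rhs => rw [pvDigitsB, dif_pos h]
        rw [ih _ (hk ▸ pvFloordiv10_toNat_lt n h) _ rfl,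
            ih _ (hk ▸ pvFloordiv10_toNat_lt n h) _ rfl ([] ++ [_])]
        simp
      · rw [pvDigitsB, dif_neg h, pvDigitsB, dif_neg h]
        simp

theorem pvDigitsB_cons (n : Int) (h : 0 < n) :
    pvDigitsB n [] = PySem.Int.mod n 10 :: pvDigitsB (PySem.Int.floordiv n 10) [] := by
  rw [pvDigitsB, dif_pos h, pvDigitsB_append]
  simp

theorem pvEnumerate_shift {α : Type} (ds : List α) (s : Int) :
    PySem.List.enumerate ds (s + 1) = (PySem.List.enumerate ds s).map (fun p => (p.1 + 1, p.2)) := by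
  rw [PySem.List.enumerate_eq_zipIdx_map, PySem.List.enumerate_eq_zipIdx_map, List.map_map]
  apply List.map_congr_left
  intro p _
  simp
  ring

theorem pvPosSum_cons (d : Int) (ds : List Int) :
    pvPosSum (d :: ds) = d * 10 ^ ds.length + pvPosSum ds := by
  unfold pvPosSum
  rw [PySem.List.enumerate_cons]
  have hsh := pvEnumerate_shift ds 0
  simp only [zero_add] at hsh ⊢
  rw [hsh]
  simp only [List.foldl_cons, List.foldl_map]
  rw [PySem.List.foldl_add, PySem.List.foldl_add]
  have hmap : (PySem.List.enumerate ds 0).map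
      (fun p => p.2 * 10 ^ ((((d :: ds).length : Int) - 1 - (p.1 + 1)).toNat)) =
      (PySem.List.enumerate ds 0).map
      (fun p => p.2 * 10 ^ (((ds.length : Int) - 1 - p.1).toNat)) := by
    apply List.map_congr_left
    intro p _
    have : (((d :: ds).length : Int) - 1 - (p.1 + 1)) = ((ds.length : Int) - 1 - p.1) := by
      simp; ring
    rw [this]
  rw [hmap]
  have hexp : ((((d :: ds).length : Int) - 1 - 0).toNat) = ds.length := by
    simp
  rw [hexp]
  ring

-- A's accumulator loop, characterized by B's digit list and positional sum
theorem pvRevLoopA_eq (n : Int) (hn : 0 ≤ n) : ∀ acc : Int,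
    pvRevLoopA n acc = acc * 10 ^ (pvDigitsB n []).length + pvPosSum (pvDigitsB n []) := by
  induction hk : n.toNat using Nat.strong_induction_on generalizing n with
  | _ k ih =>
      intro acc
      by_cases h : 0 < n
      · have hq : 0 ≤ PySem.Int.floordiv n 10 := by
          rw [PySem.Int.floordiv_eq_ediv_of_pos (by omega)]; omega
        rw [pvRevLoopA, dif_pos h,
            ih _ (hk ▸ pvFloordiv10_toNat_lt n h) _ hq rfl,
            pvDigitsB_cons n h, pvPosSum_cons]
        simp only [List.length_cons]
        ring
      · have hn0 : n = 0 := by omega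
        subst hn0
        rw [pvRevLoopA, dif_neg h, pvDigitsB, dif_neg h]
        unfold pvPosSum
        simp [PySem.List.enumerate_nil]

-- ===== VERDICT (by name: the statement is the Claim_ definition above) =====
theorem is_adam_number_spec : Claim_equal_is_adam_number := by
  intro N _ hPre
  unfold Spec_is_adam_number is_adam_number is_adam_number_alt pvRevB
  have h1 : pvRevLoopA N 0 = pvPosSum (pvDigitsB N []) := by
    rw [pvRevLoopA_eq N hPre 0]; ring
  have h2 : ∀ r : Int, pvRevLoopA (r * r) 0 = pvPosSum (pvDigitsB (r * r) []) := by
    intro r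
    rw [pvRevLoopA_eq (r * r) (mul_self_nonneg r) 0]; ring
  simp only [h1, h2]
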